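-- pv_equiv track=rewrite | github.com/SoulRe/IEEE-ZSB-Technica1-Rookies-23 | Task3/p4.py | check_for_page
-- ===== SOURCE A (Python) =====
-- def construct_book(booksize):
--     book = []
--     for i in range(0, booksize+1, 2):
--         book.append([i, i+1])
--     return book
--
-- def check_for_page(booksize, page):
--     book = construct_book(booksize)
--     countstart = countend = 0
--     for i in range(len(book)):
--         if int(page) in book[i]:
--             #starting counter is the distance from the beginning = i
--             countstart = i
--             #the ending counter is the distance from the end
--             countend = len(book) - i - 1
--             break
--     pagecount = min(countstart, countend)
--     return pagecount
-- ===== SOURCE B (Python) =====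
-- def check_for_page(booksize, page):
--     nsheets = booksize // 2 + 1          # number of sheets the book has
--     if nsheets <= 0 or page < 0 or page > 2 * nsheets - 1:
--         return 0                         # page not in the book: counters never move
--     i = page // 2                        # sheet holding the page
--     return min(i, nsheets - 1 - i)
-- ===== Notes on version B (the rewrite author's own statement) =====
-- stated objective: faster
-- what changed: B replaces A's construction of the whole sheet list and linear scan for the page with a closed-form O(1) computation: sheet index page//2, sheet count booksize//2+1, answer min(i, nsheets-1-i) with a range check.
import Mathlib
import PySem

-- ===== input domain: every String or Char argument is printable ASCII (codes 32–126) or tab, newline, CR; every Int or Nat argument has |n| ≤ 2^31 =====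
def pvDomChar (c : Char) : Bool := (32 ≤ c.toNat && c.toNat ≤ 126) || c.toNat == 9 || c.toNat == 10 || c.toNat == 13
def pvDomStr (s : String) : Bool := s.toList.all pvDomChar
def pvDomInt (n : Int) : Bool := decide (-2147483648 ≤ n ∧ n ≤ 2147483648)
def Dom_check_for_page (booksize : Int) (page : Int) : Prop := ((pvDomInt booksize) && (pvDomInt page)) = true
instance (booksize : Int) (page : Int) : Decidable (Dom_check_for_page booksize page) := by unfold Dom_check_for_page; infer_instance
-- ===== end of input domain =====

-- B replaces A's build-the-whole-book-and-scan loop by a closed-form O(1) formula (objective: faster).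

-- ===== PORT A =====
def construct_book (booksize : Int) : List (List Int) :=
  (PySem.List.pyRange 0 (booksize + 1) 2).foldl (fun book i => book ++ [[i, i + 1]]) []

-- A's 'for i in range(len(book)): … break' loop, recursing on the remaining index list
def cfpLoop (book : List (List Int)) (page : Int) : List Int → Int × Int
  | [] => (0, 0)
  | i :: rest =>
      if page ∈ PySem.List.pyGetD book i [] then
        (i, (book.length : Int) - i - 1)
      else cfpLoop book page rest

def check_for_page (booksize : Int) (page : Int) : Int :=
  let book := construct_book booksize
  let cnt := cfpLoop book page (PySem.List.pyRange 0 (book.length : Int) 1)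
  min cnt.1 cnt.2

-- ===== PORT B =====
def check_for_page_alt (booksize : Int) (page : Int) : Int :=
  let nsheets := PySem.Int.floordiv booksize 2 + 1
  if nsheets ≤ 0 ∨ page < 0 ∨ page > 2 * nsheets - 1 then 0
  else
    let i := PySem.Int.floordiv page 2
    min i (nsheets - 1 - i)

-- ===== PRECONDITION & SPEC =====
def Spec_check_for_page (booksize : Int) (page : Int) (out : Int) : Prop := out = check_for_page_alt booksize page
instance (booksize : Int) (page : Int) (out : Int) : Decidable (Spec_check_for_page booksize page out) := by unfold Spec_check_for_page; infer_instance

-- ===== CLAIM (what is proved, stated in full; the proofs are below) =====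
def Claim_equal_check_for_page : Prop := ∀ (booksize : Int) (page : Int), Dom_check_for_page booksize page → Spec_check_for_page booksize page (check_for_page booksize page)

-- ===== LEMMAS AND PROOFS =====

-- the book A builds, in closed form
def bookOf (N : Nat) : List (List Int) :=
  (List.range N).map (fun k : Nat => ([2 * (k : Int), 2 * (k : Int) + 1] : List Int))

lemma length_bookOf (N : Nat) : (bookOf N).length = N := by
  simp [bookOf]

lemma construct_book_eq (booksize : Int) :
    construct_book booksize = bookOf (PySem.Int.floordiv booksize 2 + 1).toNat := by
  unfold construct_book bookOf
  rw [PySem.List.pyRange_of_pos 0 (booksize + 1) (by norm_num),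
      PySem.List.foldl_append_singleton_eq_map, List.map_map]
  rw [PySem.Int.floordiv_eq_ediv_of_pos (by norm_num : (0:Int) < 2)]
  have hn : (if (0:Int) < booksize + 1 then ((booksize + 1 - 0 + 2 - 1) / 2).toNat else 0)
      = (booksize / 2 + 1).toNat := by split_ifs <;> omega
  rw [hn]
  simp only [List.nil_append]
  refine List.map_congr_left (fun k _ => ?_)
  norm_num

lemma getD_bookOf (N a : Nat) (h : a < N) :
    (bookOf N).getD a [] = [2 * (a : Int), 2 * (a : Int) + 1] :=
  PySem.List.getD_map_range _ _ _ _ h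

lemma cfpLoop_spec (page : Int) (N : Nat) : ∀ (d a : Nat), a + d = N →
    cfpLoop (bookOf N) page (PySem.List.pyRange (a : Int) (N : Int) 1) =
      (if 0 ≤ page ∧ page < 2 * N ∧ (a : Int) ≤ page / 2 then
        ((page / 2 : Int), (N : Int) - page / 2 - 1)
      else (0, 0)) := by
  intro d
  induction d with
  | zero =>
      intro a ha
      rw [PySem.List.pyRange_one_eq_nil (by omega)]
      rw [if_neg (by omega)]
      rfl
  | succ d ih =>
      intro a ha
      rw [PySem.List.pyRange_one_cons (by omega : (a : Int) < (N : Int))]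
      show (if page ∈ PySem.List.pyGetD (bookOf N) (a : Int) [] then _ else _) = _
      rw [PySem.List.pyGetD_natCast, getD_bookOf N a (by omega)]
      by_cases hmem : page = 2 * (a : Int) ∨ page = 2 * (a : Int) + 1
      · rw [if_pos (by simpa using hmem), if_pos (by omega)]
        rw [length_bookOf]
        have h2 : (page / 2 : Int) = (a : Int) := by omega
        rw [h2]
      · rw [if_neg (by simpa using hmem)]
        have hrec := ih (a + 1) (by omega)
        push_cast at hrec ⊢
        rw [hrec]
        have hiff : (0 ≤ page ∧ page < 2 * (N : Int) ∧ (a : Int) + 1 ≤ page / 2)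
            ↔ (0 ≤ page ∧ page < 2 * (N : Int) ∧ (a : Int) ≤ page / 2) := by
          constructor <;> intro h <;> refine ⟨h.1, h.2.1, ?_⟩ <;> omega
        by_cases hc : 0 ≤ page ∧ page < 2 * (N : Int) ∧ (a : Int) ≤ page / 2
        · rw [if_pos (hiff.mpr hc), if_pos hc]
        · rw [if_neg (fun h => hc (hiff.mp h)), if_neg hc]

-- ===== VERDICT (by name: the statement is the Claim_ definition above) =====
theorem check_for_page_spec : Claim_equal_check_for_page := by
  intro booksize page _
  unfold Spec_check_for_page
  simp only [check_for_page, check_for_page_alt, construct_book_eq, length_bookOf]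
  rw [PySem.Int.floordiv_eq_ediv_of_pos (by norm_num : (0:Int) < 2),
      PySem.Int.floordiv_eq_ediv_of_pos (by norm_num : (0:Int) < 2)]
  set N : Nat := (booksize / 2 + 1).toNat with hN
  have hloop := cfpLoop_spec page N N 0 (by omega)
  norm_num at hloop
  rw [hloop]
  have hNn : (N : Int) = max (booksize / 2 + 1) 0 := by omega
  by_cases hc : 0 ≤ page ∧ page < 2 * (N : Int) ∧ (0 : Int) ≤ page / 2
  · rw [if_pos hc, if_neg (by omega)]
    simp only [min_def]
    split_ifs <;> omega
  · rw [if_neg hc, if_pos (by omega)]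
    rfl
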